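-- pv_equiv track=rewrite | github.com/Schnouki/advent-of-code | day17/day17.py | spinlock
-- ===== SOURCE A (Python) =====
-- def spinlock(steps: int) -> int:
--     """Day 17 spinlock.
--
--     >>> spinlock(3)
--     638
--     """
--     buf = [0]
--     pos = 0
--     for n in range(2017):
--         pos = (pos + steps) % len(buf) + 1
--         buf.insert(pos, n + 1)
--
--     end_pos = (pos + 1) % len(buf)
--     return buf[end_pos]
-- ===== SOURCE B (Python) =====
-- def spinlock(steps: int) -> int:
--     """Day 17 spinlock.
--
--     >>> spinlock(3)
--     638
--     """
--     # Phase 1: track only the insertion position each round; no buffer is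
--     # built, so each of the 2017 rounds is O(1) instead of an O(n) insert.
--     positions = []
--     pos = 0
--     for size in range(1, 2018):
--         pos = (pos + steps) % size + 1
--         positions.append(pos)
--     # Phase 2: undo the insertions backwards to find which value ends up at
--     # the index right after the last inserted value.
--     q = (pos + 1) % 2018
--     for n in range(2017, 0, -1):
--         p = positions[n - 1]
--         if q == p:
--             return n
--         if q > p:
--             q -= 1
--     return 0
-- ===== Notes on version B (the rewrite author's own statement) =====
-- stated objective: faster
-- what changed: Instead of materialising the ring buffer with an O(n) list.insert per round, B records only the insertion position of each round in O(1), then walks the recorded positions backwards once to recover the single value that ends up at the queried index.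
import Mathlib
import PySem

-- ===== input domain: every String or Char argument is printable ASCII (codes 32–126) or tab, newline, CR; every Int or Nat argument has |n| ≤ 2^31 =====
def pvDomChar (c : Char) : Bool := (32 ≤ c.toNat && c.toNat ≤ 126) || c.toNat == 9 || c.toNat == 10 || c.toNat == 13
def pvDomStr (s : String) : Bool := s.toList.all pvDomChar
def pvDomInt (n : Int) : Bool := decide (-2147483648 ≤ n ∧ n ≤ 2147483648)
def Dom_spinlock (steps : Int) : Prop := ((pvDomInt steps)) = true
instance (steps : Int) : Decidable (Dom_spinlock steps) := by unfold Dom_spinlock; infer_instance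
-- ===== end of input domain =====

-- B replaces A's per-round O(n) list.insert simulation by an O(1)-per-round
-- position-recording pass plus one backward walk recovering the queried value (measured faster).


-- ===== PORT A =====
-- literal port of Source A: insert n+1 at pos = (pos+steps) % len(buf) + 1 for n in range(2017)
def spinlock (steps : Int) : Int :=
  let st := (List.range 2017).foldl
    (fun (st : List Int × Int) (n : Nat) =>
      let pos := PySem.Int.mod (st.2 + steps) (PySem.List.len st.1) + 1
      (PySem.List.insert st.1 pos ((n : Int) + 1), pos))
    ([0], 0)
  let endPos := PySem.Int.mod (st.2 + 1) (PySem.List.len st.1)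
  (PySem.List.pyGet? st.1 endPos).getD 0

-- ===== PORT B =====
-- port of Source B phase 2: "for n in range(2017, 0, -1): …" with its early return
def spinGo (positions : List Int) : Int → List Int → Int
  | _, [] => 0
  | q, n :: rest =>
    let p := (PySem.List.pyGet? positions (n - 1)).getD 0
    if q = p then n
    else if q > p then spinGo positions (q - 1) rest
    else spinGo positions q rest

def spinlock_alt (steps : Int) : Int :=
  let fwd := (PySem.List.pyRange 1 2018 1).foldl
    (fun (st : Int × List Int) (size : Int) =>
      let pos := PySem.Int.mod (st.1 + steps) size + 1
      (pos, st.2 ++ [pos]))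
    (0, [])
  let q := PySem.Int.mod (fwd.1 + 1) 2018
  spinGo fwd.2 q (PySem.List.pyRange 2017 0 (-1))

-- ===== PRECONDITION & SPEC =====
def Spec_spinlock (steps : Int) (out : Int) : Prop := out = spinlock_alt steps
instance (steps : Int) (out : Int) : Decidable (Spec_spinlock steps out) := by unfold Spec_spinlock; infer_instance

-- ===== CLAIM (what is proved, stated in full; the proofs are below) =====
def Claim_equal_spinlock : Prop := ∀ (steps : Int), Dom_spinlock steps → Spec_spinlock steps (spinlock steps)

-- ===== LEMMAS AND PROOFS =====

-- the buffer A builds, reconstructed from the list of insertion positions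
-- (value k is inserted at positions[k-1], k = 1, 2, …)
def buildBuf (ps : List Int) : List Int :=
  (ps.zipIdx 1).foldl (fun b pv => PySem.List.insert b pv.1 ((pv.2 : Int))) [0]

lemma length_foldl_insert (pairs : List (Int × Nat)) (b : List Int) :
    (pairs.foldl (fun b pv => PySem.List.insert b pv.1 ((pv.2 : Int))) b).length
      = b.length + pairs.length := by
  induction pairs generalizing b with
  | nil => simp
  | cons pv rest ih =>
      simp [List.foldl_cons, ih, PySem.List.length_insert]
      omega

lemma length_buildBuf (ps : List Int) : (buildBuf ps).length = ps.length + 1 := by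
  simp [buildBuf, length_foldl_insert]
  omega

lemma buildBuf_append (ps : List Int) (p : Int) :
    buildBuf (ps ++ [p])
      = PySem.List.insert (buildBuf ps) p ((ps.length : Int) + 1) := by
  simp [buildBuf, List.zipIdx_append, List.foldl_append]
  ring_nf

-- Python list.insert at an in-range index, as take/drop
lemma insert_eq_take_drop (xs : List Int) (p v : Int) (h0 : 0 ≤ p) (h1 : p ≤ xs.length) :
    PySem.List.insert xs p v = xs.take p.toNat ++ v :: xs.drop p.toNat := by
  conv_lhs => rw [show p = ((p.toNat : Nat) : Int) by omega]
  rw [PySem.List.insert_natCast xs p.toNat v (by omega)]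

-- the backward walk ignores a last recorded position while every index read is below it
lemma spinGo_append (ps : List Int) (p : Int) (ns : List Int) (q : Int)
    (h : ∀ n ∈ ns, 1 ≤ n ∧ n ≤ (ps.length : Int)) :
    spinGo (ps ++ [p]) q ns = spinGo ps q ns := by
  induction ns generalizing q with
  | nil => rfl
  | cons n rest ih =>
      have hn := h n (by simp)
      have hrest : ∀ m ∈ rest, 1 ≤ m ∧ m ≤ (ps.length : Int) :=
        fun m hm => h m (List.mem_cons_of_mem _ hm)
      have hget : PySem.List.pyGet? (ps ++ [p]) (n - 1) = PySem.List.pyGet? ps (n - 1) := by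
        rw [PySem.List.pyGet?_of_nonneg _ (by omega), PySem.List.pyGet?_of_nonneg _ (by omega)]
        rw [List.getElem?_append_left (by omega)]
      simp only [spinGo, hget]
      split_ifs
      · rfl
      · exact ih (q - 1) hrest
      · exact ih q hrest

-- correctness of the backward walk: it reads off buildBuf at index q
lemma spinGo_buildBuf (ps : List Int) (q : Int)
    (hb : ∀ i (h : i < ps.length), 1 ≤ ps[i] ∧ ps[i] ≤ (i : Int) + 1)
    (hq0 : 0 ≤ q) (hq1 : q < (ps.length : Int) + 1) :
    spinGo ps q (PySem.List.pyRange (ps.length : Int) 0 (-1))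
      = (PySem.List.pyGet? (buildBuf ps) q).getD 0 := by
  induction ps using List.reverseRecOn generalizing q with
  | nil =>
      have hq : q = 0 := by simp at hq1; omega
      subst hq
      rw [show ((List.length ([] : List Int) : Int)) = 0 by simp,
          PySem.List.pyRange_neg_one_eq_nil (by omega)]
      rfl
  | append_singleton ps p ih =>
      have hp : 1 ≤ p ∧ p ≤ (ps.length : Int) + 1 := by
        have := hb ps.length (by simp)
        rwa [List.getElem_concat_length rfl (by simp)] at this
      have hbps : ∀ i (h : i < ps.length), 1 ≤ ps[i] ∧ ps[i] ≤ (i : Int) + 1 := by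
        intro i h
        have := hb i (by simp; omega)
        rwa [List.getElem_append_left (by omega)] at this
      have hbbLen : (buildBuf ps).length = ps.length + 1 := length_buildBuf ps
      have hLen2 : (ps ++ [p]).length = ps.length + 1 := by simp
      have htake : (List.take p.toNat (buildBuf ps)).length = p.toNat := by
        rw [List.length_take]; omega
      rw [show (((ps ++ [p]).length : Nat) : Int) = (ps.length : Int) + 1 by simp]
      rw [PySem.List.pyRange_neg_one_cons (by omega)]
      rw [buildBuf_append, insert_eq_take_drop _ _ _ (by omega) (by omega)]
      simp only [spinGo]
      rw [show ((ps.length : Int) + 1 - 1) = ((ps.length : Nat) : Int) by ring]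
      simp only [PySem.List.pyGet?_natCast, List.getElem?_concat_length, Option.getD_some]
      by_cases hqp : q = p
      · rw [if_pos hqp, hqp, PySem.List.pyGet?_of_nonneg _ (by omega)]
        rw [List.getElem?_append_right (by omega)]
        rw [show p.toNat - (List.take p.toNat (buildBuf ps)).length = 0 by omega]
        simp
      · rw [if_neg hqp]
        by_cases hgt : q > p
        · rw [if_pos hgt]
          rw [spinGo_append ps p _ (q - 1)
                (by intro n hn
                    have := PySem.List.mem_pyRange_neg_one.1 hn
                    omega)]
          rw [ih (q - 1) hbps (by omega) (by omega)]
          rw [PySem.List.pyGet?_of_nonneg _ (by omega),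
              PySem.List.pyGet?_of_nonneg _ (by omega)]
          rw [List.getElem?_append_right (by omega), List.getElem?_cons,
              if_neg (by omega), List.getElem?_drop]
          rw [show p.toNat + (q.toNat - (List.take p.toNat (buildBuf ps)).length - 1)
                = (q - 1).toNat by omega]
        · rw [if_neg hgt]
          have hlt : q < p := by omega
          rw [spinGo_append ps p _ q
                (by intro n hn
                    have := PySem.List.mem_pyRange_neg_one.1 hn
                    omega)]
          rw [ih q hbps hq0 (by omega)]
          rw [PySem.List.pyGet?_of_nonneg _ hq0, PySem.List.pyGet?_of_nonneg _ hq0]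
          rw [List.getElem?_append_left (by omega), List.getElem?_take_of_lt (by omega)]

-- forward phase: A's fold and B's fold over the same round list
def foldA (steps : Int) (m : Nat) : List Int × Int :=
  (List.range m).foldl
    (fun (st : List Int × Int) (n : Nat) =>
      let pos := PySem.Int.mod (st.2 + steps) (PySem.List.len st.1) + 1
      (PySem.List.insert st.1 pos ((n : Int) + 1), pos))
    ([0], 0)

def foldB (steps : Int) (m : Nat) : Int × List Int :=
  (List.range m).foldl
    (fun (st : Int × List Int) (k : Nat) =>
      let pos := PySem.Int.mod (st.1 + steps) (1 + (k : Int)) + 1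
      (pos, st.2 ++ [pos]))
    (0, [])

lemma foldA_succ (steps : Int) (m : Nat) :
    foldA steps (m + 1) =
      (PySem.List.insert (foldA steps m).1
         (PySem.Int.mod ((foldA steps m).2 + steps) (PySem.List.len (foldA steps m).1) + 1)
         ((m : Int) + 1),
       PySem.Int.mod ((foldA steps m).2 + steps) (PySem.List.len (foldA steps m).1) + 1) := by
  simp [foldA, List.range_succ]

lemma foldB_succ (steps : Int) (m : Nat) :
    foldB steps (m + 1) =
      (PySem.Int.mod ((foldB steps m).1 + steps) (1 + (m : Int)) + 1,
       (foldB steps m).2 ++ [PySem.Int.mod ((foldB steps m).1 + steps) (1 + (m : Int)) + 1]) := by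
  simp [foldB, List.range_succ]

lemma fwd_inv (steps : Int) (m : Nat) :
    (foldA steps m).2 = (foldB steps m).1
    ∧ (foldA steps m).1 = buildBuf (foldB steps m).2
    ∧ (foldB steps m).2.length = m
    ∧ 0 ≤ (foldA steps m).2 ∧ (foldA steps m).2 ≤ (m : Int)
    ∧ (∀ i (h : i < (foldB steps m).2.length),
        1 ≤ (foldB steps m).2[i] ∧ (foldB steps m).2[i] ≤ (i : Int) + 1) := by
  induction m with
  | zero =>
      refine ⟨rfl, rfl, rfl, le_refl 0, by simp [foldA], ?_⟩
      intro i h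
      simp [foldB] at h
  | succ m ih =>
      obtain ⟨h1, h2, h3, h4, h5, h6⟩ := ih
      have hlenA : PySem.List.len (foldA steps m).1 = (m : Int) + 1 := by
        rw [PySem.List.len_eq, h2, length_buildBuf, h3]; push_cast; ring
      have hcomm : ((m : Int) + 1) = (1 + (m : Int)) := by ring
      have hm0 : 0 ≤ PySem.Int.mod ((foldB steps m).1 + steps) (1 + (m : Int)) :=
        PySem.Int.mod_nonneg _ (by omega)
      have hm1 : PySem.Int.mod ((foldB steps m).1 + steps) (1 + (m : Int)) < 1 + (m : Int) :=
        PySem.Int.mod_lt _ (by omega)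
      rw [foldA_succ, foldB_succ]
      refine ⟨?_, ?_, ?_, ?_, ?_, ?_⟩
      · rw [hlenA, h1, hcomm]
      · rw [buildBuf_append, h3, ← h2, hlenA, h1, hcomm]
      · simp [h3]
      · rw [hlenA, h1, hcomm]; omega
      · rw [hlenA, h1, hcomm]; push_cast; omega
      · intro i hi
        simp only [List.length_append, List.length_singleton, h3] at hi
        by_cases hi' : i < (foldB steps m).2.length
        · rw [List.getElem_append_left hi']
          exact h6 i hi'
        · have hieq : i = (foldB steps m).2.length := by omega
          subst hieq
          rw [List.getElem_concat_length rfl (by simp)]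
          constructor
          · omega
          · rw [h3] at *; omega

-- B's fold over pyRange 1 2018 1 is foldB
lemma fwd_alt_eq (steps : Int) :
    (PySem.List.pyRange 1 2018 1).foldl
      (fun (st : Int × List Int) (size : Int) =>
        let pos := PySem.Int.mod (st.1 + steps) size + 1
        (pos, st.2 ++ [pos]))
      (0, []) = foldB steps 2017 := by
  rw [PySem.List.pyRange_one, show ((2018:Int) - 1).toNat = 2017 from rfl, List.foldl_map]
  rfl

-- ===== VERDICT (by name: the statement is the Claim_ definition above) =====
theorem spinlock_spec : Claim_equal_spinlock := by
  intro steps _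
  unfold Spec_spinlock spinlock spinlock_alt
  rw [fwd_alt_eq]
  obtain ⟨h1, h2, h3, h4, h5, h6⟩ := fwd_inv steps 2017
  show (PySem.List.pyGet? (foldA steps 2017).1
          (PySem.Int.mod ((foldA steps 2017).2 + 1) (PySem.List.len (foldA steps 2017).1))).getD 0
      = spinGo (foldB steps 2017).2 (PySem.Int.mod ((foldB steps 2017).1 + 1) 2018)
          (PySem.List.pyRange 2017 0 (-1))
  have hlen : PySem.List.len (foldA steps 2017).1 = (2018 : Int) := by
    rw [PySem.List.len_eq, h2, length_buildBuf, h3]; norm_num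
  have hcnt : ((foldB steps 2017).2.length : Int) = 2017 := by rw [h3]; norm_num
  rw [hlen, h1, h2]
  rw [← hcnt]
  rw [spinGo_buildBuf]
  · intro i hi; exact h6 i hi
  · exact PySem.Int.mod_nonneg _ (by omega)
  · have := PySem.Int.mod_lt ((foldB steps 2017).1 + 1) (b := 2018) (by omega)
    omega
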